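-- pv_equiv track=rewrite | github.com/SystemThinking/kmea | core/scripts/tools/base_fm.py | _build_placeholder_mapping_from_fm
-- ===== SOURCE A (Python) =====
-- from typing import Dict, Any, Optional, List
--
-- def _strip_yaml_value(value: str) -> str:
--     if not value:
--         return ""
--     if (value.startswith("'") and value.endswith("'")) or (
--         value.startswith('"') and value.endswith('"')
--     ):
--         return value[1:-1]
--     return value
--
-- def _extract_fm_scalar(fm_lines: List[str], key: str) -> str:
--     key_prefix = f"{key}:"
--     for line in fm_lines:
--         stripped = line.lstrip()
--         if stripped.startswith(key_prefix):
--             try: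
--                 _, raw_val = stripped.split(":", 1)
--             except ValueError:
--                 return ""
--             return _strip_yaml_value(raw_val.strip())
--     return ""
--
-- def _build_placeholder_mapping_from_fm(fm_lines: List[str]) -> Dict[str, str]:
--     mapping: Dict[str, str] = {}
--     key_pairs = [
--         ("id", "ID"),
--         ("title", "TITLE"),
--         ("guid", "GUID"),
--         ("status", "STATUS"),
--         ("license", "LICENSE"),
--         ("author", "AUTHOR"),
--         ("dao", "DAO"),
--         ("locale", "LOCALE"),
--         ("instance", "INSTANCE"),
--         ("created", "CREATED"),
--     ]
--     for fm_key, ph_key in key_pairs: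
--         val = _extract_fm_scalar(fm_lines, fm_key)
--         mapping[ph_key] = val or ""
--     return mapping
-- ===== SOURCE B (Python) =====
-- from typing import Dict, List
--
-- def _strip_yaml_value(value: str) -> str:
--     if not value:
--         return ""
--     if (value.startswith("'") and value.endswith("'")) or (
--         value.startswith('"') and value.endswith('"')
--     ):
--         return value[1:-1]
--     return value
--
-- _KEY_PAIRS = [
--     ("id", "ID"),
--     ("title", "TITLE"),
--     ("guid", "GUID"),
--     ("status", "STATUS"),
--     ("license", "LICENSE"),
--     ("author", "AUTHOR"),
--     ("dao", "DAO"),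
--     ("locale", "LOCALE"),
--     ("instance", "INSTANCE"),
--     ("created", "CREATED"),
-- ]
--
-- def _build_placeholder_mapping_from_fm(fm_lines: List[str]) -> Dict[str, str]:
--     # One pass over fm_lines builds a first-occurrence index keyed by the text
--     # before the first ':'; the mapping is then ten O(1) lookups.
--     index: Dict[str, str] = {}
--     for line in fm_lines:
--         stripped = line.lstrip()
--         if ":" not in stripped:
--             continue
--         k, v = stripped.split(":", 1)
--         if k not in index:
--             index[k] = _strip_yaml_value(v.strip())
--     return {ph_key: index.get(fm_key, "") for fm_key, ph_key in _KEY_PAIRS}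
-- ===== Notes on version B (the rewrite author's own statement) =====
-- stated objective: faster
-- what changed: Replaces the per-key full scan of fm_lines (one _extract_fm_scalar pass, with a fresh lstrip of every line, per placeholder key) with a single pass that builds a first-occurrence index keyed by the text before the first ':', followed by ten O(1) dictionary lookups.
import Mathlib
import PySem

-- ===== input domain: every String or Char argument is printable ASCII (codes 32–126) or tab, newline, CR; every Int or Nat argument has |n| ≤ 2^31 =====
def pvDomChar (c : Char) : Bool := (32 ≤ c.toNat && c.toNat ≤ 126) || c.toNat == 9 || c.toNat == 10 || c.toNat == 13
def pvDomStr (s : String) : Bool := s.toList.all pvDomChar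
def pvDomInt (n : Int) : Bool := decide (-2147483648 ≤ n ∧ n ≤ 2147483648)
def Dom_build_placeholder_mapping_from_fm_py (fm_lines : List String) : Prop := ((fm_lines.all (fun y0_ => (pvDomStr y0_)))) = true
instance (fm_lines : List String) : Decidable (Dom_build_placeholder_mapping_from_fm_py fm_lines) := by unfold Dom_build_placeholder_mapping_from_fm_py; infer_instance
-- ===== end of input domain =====

-- B builds a first-occurrence index of fm_lines in ONE pass and answers the ten keys by O(1)
-- lookup, instead of A's one full scan of fm_lines per key (measured faster in a timing run).

-- shared module helper _strip_yaml_value (used verbatim by both A and B)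
def strip_yaml_value (value : String) : String :=
  if value = "" then ""
  else if (PySem.Str.startswith value "'" && PySem.Str.endswith value "'")
       || (PySem.Str.startswith value "\"" && PySem.Str.endswith value "\"") then
    PySem.Str.slice value (some 1) (some (-1))
  else value

-- the literal key_pairs table (identical data in A and B)
def key_pairs : List (String × String) :=
  [("id", "ID"), ("title", "TITLE"), ("guid", "GUID"), ("status", "STATUS"),
   ("license", "LICENSE"), ("author", "AUTHOR"), ("dao", "DAO"), ("locale", "LOCALE"),
   ("instance", "INSTANCE"), ("created", "CREATED")]

-- ===== PORT A =====
-- _extract_fm_scalar's for-loop; key_prefix = f"{key}:" is computed once before the loop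
def extract_fm_scalar_loop (fm_lines : List String) (key_prefix : String) : String :=
  match fm_lines with
  | [] => ""
  | line :: rest =>
    let stripped := PySem.Str.lstrip line
    if PySem.Str.startswith stripped key_prefix then
      -- stripped.split(":", 1); a one-element result would raise ValueError on unpack → except returns ""
      match PySem.Str.splitMax? stripped ":" 1 with
      | some [_, raw_val] => strip_yaml_value (PySem.Str.strip raw_val)
      | _ => ""
    else extract_fm_scalar_loop rest key_prefix

def extract_fm_scalar (fm_lines : List String) (key : String) : String :=
  -- f"{key}:" (exact string concatenation on char lists)
  extract_fm_scalar_loop fm_lines (String.ofList (key.toList ++ [':']))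

def build_placeholder_mapping_from_fm_py (fm_lines : List String) : List (String × String) :=
  (key_pairs.foldl (fun mapping kv =>
      let val := extract_fm_scalar fm_lines kv.1
      mapping.insert kv.2 (if val = "" then "" else val))   -- mapping[ph_key] = val or ""
    PySem.Dict.empty).items

-- ===== PORT B =====
-- the body of B's single for-loop over fm_lines
def buildStep (index : PySem.Dict String String) (line : String) : PySem.Dict String String :=
  let stripped := PySem.Str.lstrip line
  if PySem.Str.isIn ":" stripped then
    match PySem.Str.splitMax? stripped ":" 1 with
    | some [k, v] =>
        if index.contains k then index
        else index.insert k (strip_yaml_value (PySem.Str.strip v))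
    | _ => index   -- unreachable: with ':' in stripped, split(":", 1) has exactly two parts
  else index

def build_index (fm_lines : List String) : PySem.Dict String String :=
  fm_lines.foldl buildStep PySem.Dict.empty

def build_placeholder_mapping_from_fm_py_alt (fm_lines : List String) : List (String × String) :=
  -- {ph_key: index.get(fm_key, "") for fm_key, ph_key in _KEY_PAIRS} (ten distinct literal keys)
  key_pairs.map (fun kv => (kv.2, (build_index fm_lines).getD kv.1 ""))

-- ===== PRECONDITION & SPEC =====
def Spec_build_placeholder_mapping_from_fm_py (fm_lines : List String) (out : List (String × String)) : Prop := out = build_placeholder_mapping_from_fm_py_alt fm_lines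
instance (fm_lines : List String) (out : List (String × String)) : Decidable (Spec_build_placeholder_mapping_from_fm_py fm_lines out) := by unfold Spec_build_placeholder_mapping_from_fm_py; infer_instance

-- ===== CLAIM (what is proved, stated in full; the proofs are below) =====
def Claim_equal_build_placeholder_mapping_from_fm_py : Prop := ∀ (fm_lines : List String), Dom_build_placeholder_mapping_from_fm_py fm_lines → Spec_build_placeholder_mapping_from_fm_py fm_lines (build_placeholder_mapping_from_fm_py fm_lines)

-- ===== LEMMAS AND PROOFS =====

-- String.ofList is a left inverse of String.toList
lemma str_ofList_toList (s : String) : String.ofList s.toList = s :=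
  String.toList_inj.mp String.toList_ofList

-- s.split(":", 1): characterisation of the fuelled splitter for the separator ":"
lemma go_zero (fuel : Nat) (l cur : List Char) (acc : List (List Char)) :
    PySem.Chars.splitOnMax.go [':'] fuel 0 l cur acc = ((cur.reverse ++ l) :: acc).reverse := by
  cases fuel <;> cases l <;> simp [PySem.Chars.splitOnMax.go]

lemma go_one (cs : List Char) : ∀ (fuel : Nat) (cur : List Char) (acc : List (List Char)),
    cs.length < fuel →
    PySem.Chars.splitOnMax.go [':'] fuel 1 cs cur acc =
      (if ':' ∈ cs
       then acc.reverse ++ [cur.reverse ++ cs.takeWhile (fun c => c != ':'),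
                            (cs.dropWhile (fun c => c != ':')).tail]
       else acc.reverse ++ [cur.reverse ++ cs]) := by
  induction cs with
  | nil =>
    intro fuel cur acc h
    cases fuel with
    | zero => omega
    | succ f => simp [PySem.Chars.splitOnMax.go]
  | cons c rest ih =>
    intro fuel cur acc h
    cases fuel with
    | zero => omega
    | succ f =>
      by_cases hc : c = ':'
      · subst hc
        have h1 : PySem.Chars.splitOnMax.go [':'] (f+1) 1 (':' :: rest) cur acc
            = PySem.Chars.splitOnMax.go [':'] f 0 rest [] (cur.reverse :: acc) := by
          simp [PySem.Chars.splitOnMax.go, List.isPrefixOf]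
        rw [h1, go_zero]
        simp
      · have h1 : PySem.Chars.splitOnMax.go [':'] (f+1) 1 (c :: rest) cur acc
            = PySem.Chars.splitOnMax.go [':'] f 1 rest (c :: cur) acc := by
          simp [PySem.Chars.splitOnMax.go, List.isPrefixOf, hc, Ne.symm hc]
        rw [h1, ih f (c :: cur) acc (by simpa using h)]
        by_cases hm : ':' ∈ rest
        · simp [hm, hc, Ne.symm hc]
        · simp [hm, hc, Ne.symm hc]

lemma chars_splitMax_colon (cs : List Char) (h : ':' ∈ cs) :
    PySem.Chars.splitMax? cs [':'] 1 =
      some [cs.takeWhile (fun c => c != ':'), (cs.dropWhile (fun c => c != ':')).tail] := by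
  have hgo := go_one cs (cs.length + 1) [] [] (by omega)
  rw [if_pos h] at hgo
  simp [PySem.Chars.splitMax?, PySem.Chars.splitOnMax, hgo]

lemma splitMax?_colon (s : String) (h : ':' ∈ s.toList) :
    PySem.Str.splitMax? s ":" 1 =
      some [String.ofList (s.toList.takeWhile (fun c => c != ':')),
            String.ofList ((s.toList.dropWhile (fun c => c != ':')).tail)] := by
  have hc : (":" : String).toList = [':'] := rfl
  simp only [PySem.Str.splitMax?, hc, chars_splitMax_colon s.toList h, Option.map_some, List.map]

-- stripped.startswith(key + ":") for a key without ':' means: stripped contains ':' and the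
-- text before the first ':' is exactly key
lemma prefix_colon_iff (k : List Char) (hk : ':' ∉ k) : ∀ cs : List Char,
    ((k ++ [':']).isPrefixOf cs = true ↔ ':' ∈ cs ∧ cs.takeWhile (fun c => c != ':') = k) := by
  induction k with
  | nil =>
    intro cs
    cases cs with
    | nil => simp [List.isPrefixOf]
    | cons c rest =>
      by_cases hc : c = ':'
      · subst hc; simp [List.isPrefixOf, List.takeWhile_cons]
      · simp [List.isPrefixOf, List.takeWhile_cons, hc, Ne.symm hc]
  | cons a k' ih =>
    intro cs
    have ha : a ≠ ':' := fun h => hk (by simp [h])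
    have hk' : ':' ∉ k' := fun h => hk (by simp [h])
    cases cs with
    | nil => simp [List.isPrefixOf]
    | cons c rest =>
      by_cases hc : c = a
      · subst hc
        have := ih hk' rest
        simp [List.isPrefixOf, List.takeWhile_cons, ha, this, Ne.symm ha, And.comm]
      · by_cases hcc : c = ':'
        · subst hcc; simp [List.isPrefixOf, List.takeWhile_cons, Ne.symm hc]
        · simp [List.isPrefixOf, List.takeWhile_cons, hcc, Ne.symm hcc, hc, Ne.symm hc]

lemma startswith_key_iff (s k : String) (hk : ':' ∉ k.toList) :
    (PySem.Str.startswith s (String.ofList (k.toList ++ [':'])) = true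
      ↔ ':' ∈ s.toList ∧ s.toList.takeWhile (fun c => c != ':') = k.toList) := by
  rw [← prefix_colon_iff k.toList hk s.toList]
  simp [PySem.Str.startswith, PySem.Chars.startswith]

lemma isIn_colon_iff (s : String) : PySem.Str.isIn ":" s = true ↔ ':' ∈ s.toList := by
  rw [PySem.Str.isIn_iff_infix]
  have hc : (":" : String).toList = [':'] := rfl
  rw [hc]
  constructor
  · rintro ⟨l, r, hl⟩
    rw [← hl]; simp
  · intro h
    rcases List.append_of_mem h with ⟨l, r, hE⟩
    exact ⟨l, r, by rw [hE]; simp⟩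

-- extract_fm_scalar as an Option (none = no line matched); same branching as port A
def extract? : List String → String → Option String
  | [], _ => none
  | line :: rest, k =>
    let stripped := PySem.Str.lstrip line
    if PySem.Str.startswith stripped (String.ofList (k.toList ++ [':'])) then
      some (match PySem.Str.splitMax? stripped ":" 1 with
            | some [_, raw_val] => strip_yaml_value (PySem.Str.strip raw_val)
            | _ => "")
    else extract? rest k

lemma extract_eq_extract? (lines : List String) (k : String) :
    extract_fm_scalar lines k = (extract? lines k).getD "" := by
  induction lines with
  | nil => rfl
  | cons line rest ih =>
    show extract_fm_scalar_loop (line :: rest) (String.ofList (k.toList ++ [':'])) = _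
    have h1 : extract_fm_scalar_loop (line :: rest) (String.ofList (k.toList ++ [':'])) =
        (if PySem.Str.startswith (PySem.Str.lstrip line) (String.ofList (k.toList ++ [':'])) then
          (match PySem.Str.splitMax? (PySem.Str.lstrip line) ":" 1 with
           | some [_, raw_val] => strip_yaml_value (PySem.Str.strip raw_val)
           | _ => "")
         else extract_fm_scalar_loop rest (String.ofList (k.toList ++ [':']))) := rfl
    have h2 : extract? (line :: rest) k =
        (if PySem.Str.startswith (PySem.Str.lstrip line) (String.ofList (k.toList ++ [':'])) then
          some (match PySem.Str.splitMax? (PySem.Str.lstrip line) ":" 1 with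
                | some [_, raw_val] => strip_yaml_value (PySem.Str.strip raw_val)
                | _ => "")
         else extract? rest k) := rfl
    rw [h1, h2]
    by_cases h : PySem.Str.startswith (PySem.Str.lstrip line) (String.ofList (k.toList ++ [':'])) = true
    · rw [if_pos h, if_pos h]
      rfl
    · rw [if_neg h, if_neg h]
      exact ih

-- the single-pass index agrees with A's scan: looking up k in the fold finds the first match
lemma get?_foldl_buildStep (lines : List String) :
    ∀ (d : PySem.Dict String String) (k : String), ':' ∉ k.toList →
      (lines.foldl buildStep d).get? k = ((d.get? k).or (extract? lines k)) := by
  induction lines with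
  | nil => intro d k hk; cases h : d.get? k <;> simp [extract?, h]
  | cons line rest ih =>
    intro d k hk
    rw [List.foldl_cons, ih (buildStep d line) k hk]
    have hstep_def : buildStep d line =
        (if PySem.Str.isIn ":" (PySem.Str.lstrip line) then
          (match PySem.Str.splitMax? (PySem.Str.lstrip line) ":" 1 with
           | some [k', v] => if d.contains k' then d
                             else d.insert k' (strip_yaml_value (PySem.Str.strip v))
           | _ => d)
         else d) := rfl
    have hext_def : extract? (line :: rest) k =
        (if PySem.Str.startswith (PySem.Str.lstrip line) (String.ofList (k.toList ++ [':'])) then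
          some (match PySem.Str.splitMax? (PySem.Str.lstrip line) ":" 1 with
                | some [_, raw_val] => strip_yaml_value (PySem.Str.strip raw_val)
                | _ => "")
         else extract? rest k) := rfl
    by_cases hin : PySem.Str.isIn ":" (PySem.Str.lstrip line) = true
    · have hmem : ':' ∈ (PySem.Str.lstrip line).toList := (isIn_colon_iff _).1 hin
      have hsplit := splitMax?_colon _ hmem
      have hstep : buildStep d line =
          (if d.contains (String.ofList ((PySem.Str.lstrip line).toList.takeWhile (fun c => c != ':')))
           then d
           else d.insert
                  (String.ofList ((PySem.Str.lstrip line).toList.takeWhile (fun c => c != ':')))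
                  (strip_yaml_value (PySem.Str.strip
                    (String.ofList (((PySem.Str.lstrip line).toList.dropWhile (fun c => c != ':')).tail))))) := by
        rw [hstep_def, if_pos hin, hsplit]
      have hext : extract? (line :: rest) k =
          (if PySem.Str.startswith (PySem.Str.lstrip line) (String.ofList (k.toList ++ [':'])) then
            some (strip_yaml_value (PySem.Str.strip
                   (String.ofList (((PySem.Str.lstrip line).toList.dropWhile (fun c => c != ':')).tail))))
           else extract? rest k) := by
        rw [hext_def, hsplit]
      rw [hstep, hext]
      by_cases hkk : String.ofList ((PySem.Str.lstrip line).toList.takeWhile (fun c => c != ':')) = k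
      · have hsw : PySem.Str.startswith (PySem.Str.lstrip line)
            (String.ofList (k.toList ++ [':'])) = true := by
          rw [startswith_key_iff _ _ hk]
          refine ⟨hmem, ?_⟩
          rw [← hkk, String.toList_ofList]
        rw [if_pos hsw]
        by_cases hcont : d.contains (String.ofList ((PySem.Str.lstrip line).toList.takeWhile (fun c => c != ':'))) = true
        · rw [if_pos hcont]
          rw [hkk, PySem.Dict.contains_eq_isSome_get?] at hcont
          rcases hg : d.get? k with _ | w
          · rw [hg] at hcont; simp at hcont
          · simp [Option.or]
        · rw [if_neg hcont, hkk] at *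
          rw [PySem.Dict.contains_eq_isSome_get?] at hcont
          have hnone : d.get? k = none := by
            rcases hg : d.get? k with _ | w
            · rfl
            · rw [hg] at hcont; simp at hcont
          rw [hnone, PySem.Dict.get?_insert_self]
          simp
      · have hsw : PySem.Str.startswith (PySem.Str.lstrip line)
            (String.ofList (k.toList ++ [':'])) = false := by
          cases hswb : PySem.Str.startswith (PySem.Str.lstrip line) (String.ofList (k.toList ++ [':']))
          · rfl
          · exfalso
            rcases (startswith_key_iff _ _ hk).1 hswb with ⟨_, htw⟩
            exact hkk (by rw [htw, str_ofList_toList])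
        rw [if_neg (show ¬ (PySem.Str.startswith (PySem.Str.lstrip line)
              (String.ofList (k.toList ++ [':'])) = true) by rw [hsw]; simp)]
        by_cases hcont : d.contains (String.ofList ((PySem.Str.lstrip line).toList.takeWhile (fun c => c != ':'))) = true
        · rw [if_pos hcont]
        · rw [if_neg hcont,
              PySem.Dict.get?_insert_of_ne _ _ (fun hEq => hkk hEq.symm)]
    · have hstep : buildStep d line = d := by
        rw [hstep_def, if_neg hin]
      have hsw : PySem.Str.startswith (PySem.Str.lstrip line)
          (String.ofList (k.toList ++ [':'])) = false := by
        cases hswb : PySem.Str.startswith (PySem.Str.lstrip line) (String.ofList (k.toList ++ [':']))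
        · rfl
        · exact absurd ((isIn_colon_iff _).2 ((startswith_key_iff _ _ hk).1 hswb).1) hin
      rw [hstep, hext_def, if_neg (show ¬ (PySem.Str.startswith (PySem.Str.lstrip line)
            (String.ofList (k.toList ++ [':'])) = true) by rw [hsw]; simp)]

lemma extract_eq_getD (lines : List String) (k : String) (hk : ':' ∉ k.toList) :
    extract_fm_scalar lines k = (build_index lines).getD k "" := by
  rw [extract_eq_extract?, PySem.Dict.getD_eq_get?_getD, build_index,
      get?_foldl_buildStep lines PySem.Dict.empty k hk]
  simp

lemma or_empty (val : String) : (if val = "" then "" else val) = val := by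
  by_cases h : val = "" <;> simp [h]

-- ===== VERDICT (by name: the statement is the Claim_ definition above) =====
theorem build_placeholder_mapping_from_fm_py_spec : Claim_equal_build_placeholder_mapping_from_fm_py := by
  intro fm_lines _
  show _ = _
  unfold build_placeholder_mapping_from_fm_py build_placeholder_mapping_from_fm_py_alt
  have hA : (key_pairs.foldl (fun (mapping : PySem.Dict String String) (kv : String × String) =>
        let val := extract_fm_scalar fm_lines kv.1
        mapping.insert kv.2 (if val = "" then "" else val)) PySem.Dict.empty).items
      = (PySem.Dict.empty : PySem.Dict String String).items ++ key_pairs.map (fun kv =>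
          (kv.2, if extract_fm_scalar fm_lines kv.1 = "" then "" else extract_fm_scalar fm_lines kv.1)) :=
    PySem.Dict.items_foldl_insert_fresh (l := key_pairs) (d := PySem.Dict.empty)
      (k := fun kv : String × String => kv.2)
      (v := fun kv : String × String =>
        if extract_fm_scalar fm_lines kv.1 = "" then "" else extract_fm_scalar fm_lines kv.1)
      (by intro a _; simp) (by decide)
  rw [hA, show (PySem.Dict.empty : PySem.Dict String String).items = [] from rfl,
      List.nil_append]
  apply List.map_congr_left
  intro kv hkv
  rw [or_empty]
  have hnc : ∀ p ∈ key_pairs, ':' ∉ (p.1 : String).toList := by decide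
  exact congrArg _ (extract_eq_getD fm_lines kv.1 (hnc kv hkv))
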